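-- pv_equiv track=rewrite | github.com/nairamith/dublin_bike_station_occupancy_prediction | Codefiles/HKTest.py | func
-- ===== SOURCE A (Python) =====
-- import math
--
-- def func(s):
--     output = []
--     l = math.floor(len(s)/2)
--     for i in range(1, l+1):
--         temp = "0"*i + "1"*i
--         if temp in s:
--             output.append(temp)
--         temp = "1"*i + "0"*i
--         if temp in s:
--             output.append(temp)
--
--     return len(output)
-- ===== SOURCE B (Python) =====
-- def _update(m01, m10, prev, cur):
--     # record the 0->1 / 1->0 run boundary between prev and cur, if any
--     if prev is not None and cur is not None:
--         if prev[0] == '0' and cur[0] == '1':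
--             m01 = max(m01, min(prev[1], cur[1]))
--         elif prev[0] == '1' and cur[0] == '0':
--             m10 = max(m10, min(prev[1], cur[1]))
--     return m01, m10, prev, cur
--
-- def func(s):
--     # One pass over s with run-length tracking.  For every boundary between a
--     # '0'-run and a '1'-run, the substrings "0"*i+"1"*i exist exactly for
--     # 1 <= i <= min(run lengths), so A's count is max-min over 0->1 boundaries
--     # plus max-min over 1->0 boundaries.
--     m01 = 0
--     m10 = 0
--     prev = None  # (char, length) of the run just before the current run
--     cur = None   # (char, length) of the current (trailing) run
--     for ch in s:
--         if cur is not None and cur[0] == ch: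
--             m01, m10, prev, cur = _update(m01, m10, prev, (ch, cur[1] + 1))
--         else:
--             m01, m10, prev, cur = _update(m01, m10, cur, (ch, 1))
--     return m01 + m10
-- ===== Notes on version B (the rewrite author's own statement) =====
-- stated objective: faster
-- what changed: Replaces the loop over all pattern lengths with repeated substring searches by a single run-length pass that takes max(min(adjacent run lengths)) over 0->1 and over 1->0 run boundaries and returns their sum.
import Mathlib
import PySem

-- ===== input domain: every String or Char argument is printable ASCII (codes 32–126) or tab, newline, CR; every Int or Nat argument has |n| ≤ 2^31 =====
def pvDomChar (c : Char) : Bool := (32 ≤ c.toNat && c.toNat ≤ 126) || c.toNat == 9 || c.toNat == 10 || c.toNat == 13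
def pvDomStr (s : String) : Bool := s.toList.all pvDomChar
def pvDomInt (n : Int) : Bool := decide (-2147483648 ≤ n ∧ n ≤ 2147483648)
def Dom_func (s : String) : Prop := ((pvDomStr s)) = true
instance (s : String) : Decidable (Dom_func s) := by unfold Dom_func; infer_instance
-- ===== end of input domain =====

-- B replaces A's loop over all pattern half-lengths with repeated substring searches by a
-- single run-length pass (max of min adjacent run lengths over 0->1 and over 1->0 boundaries).

-- ===== PORT A =====
-- one iteration of A's loop body (output is the growing list, i the pattern half-length)
def funcStep (s : String) (output : List (List Char)) (i : Int) : List (List Char) :=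
  let temp := PySem.List.pyRepeat ['0'] i ++ PySem.List.pyRepeat ['1'] i
  let output := if PySem.Chars.isIn temp s.toList then output ++ [temp] else output
  let temp := PySem.List.pyRepeat ['1'] i ++ PySem.List.pyRepeat ['0'] i
  if PySem.Chars.isIn temp s.toList then output ++ [temp] else output

def func (s : String) : Int :=
  -- math.floor(len(s)/2) = len(s) // 2 exactly (the length is an exact float here)
  let l := PySem.Int.floordiv (PySem.Str.len s) 2
  let output := (PySem.List.pyRange 1 (l + 1) 1).foldl (funcStep s) []
  (output.length : Int)

-- ===== PORT B =====
-- _update in Source B: record the 0->1 / 1->0 boundary between prev and cur, if any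
def funcAltUpd (m01 m10 : Int) (prev cur : Option (Char × Int)) :
    Int × Int × Option (Char × Int) × Option (Char × Int) :=
  match prev, cur with
  | some (p, pl), some (c, cl) =>
      if p == '0' && c == '1' then (max m01 (min pl cl), m10, some (p, pl), some (c, cl))
      else if p == '1' && c == '0' then (m01, max m10 (min pl cl), some (p, pl), some (c, cl))
      else (m01, m10, some (p, pl), some (c, cl))
  | prev, cur => (m01, m10, prev, cur)

-- the loop body: state is (m01, m10, prev run, cur run); a run is (char, length)
def funcAltStep (st : Int × Int × Option (Char × Int) × Option (Char × Int)) (ch : Char) :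
    Int × Int × Option (Char × Int) × Option (Char × Int) :=
  match st with
  | (m01, m10, prev, none) => funcAltUpd m01 m10 prev (some (ch, 1))
  | (m01, m10, prev, some (c, n)) =>
      if c == ch then funcAltUpd m01 m10 prev (some (ch, n + 1))
      else funcAltUpd m01 m10 (some (c, n)) (some (ch, 1))

def func_alt (s : String) : Int :=
  let st := s.toList.foldl funcAltStep (0, 0, none, none)
  st.1 + st.2.1

-- ===== PRECONDITION & SPEC =====
def Spec_func (s : String) (out : Int) : Prop := out = func_alt s
instance (s : String) (out : Int) : Decidable (Spec_func s out) := by unfold Spec_func; infer_instance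

-- ===== CLAIM (what is proved, stated in full; the proofs are below) =====
def Claim_equal_func : Prop := ∀ (s : String), Dom_func s → Spec_func s (func s)

-- ===== LEMMAS AND PROOFS =====

-- the pattern a^i b^i
def pvPat (a b : Char) (i : Nat) : List Char := List.replicate i a ++ List.replicate i b

-- m is the largest i (0 if none) such that a^i b^i is an infix of l
def MChar (l : List Char) (a b : Char) (m : Int) : Prop :=
  0 ≤ m ∧ ∀ i : Nat, 0 < i → (pvPat a b i <:+: l ↔ (i : Int) ≤ m)

-- prev/cur describe the last two runs of l
def RunsOK (l : List Char) (prev cur : Option (Char × Int)) : Prop :=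
  (cur = none ∧ prev = none ∧ l = []) ∨
  (∃ (c : Char) (cl : Nat), cur = some (c, (cl : Int)) ∧ 0 < cl ∧
    ((prev = none ∧ l = List.replicate cl c) ∨
     (∃ (p : Char) (pl : Nat) (l0 : List Char), prev = some (p, (pl : Int)) ∧ 0 < pl ∧ p ≠ c ∧
        l = l0 ++ List.replicate pl p ++ List.replicate cl c ∧ l0.getLast? ≠ some p)))

def PInv (l : List Char) (st : Int × Int × Option (Char × Int) × Option (Char × Int)) : Prop :=
  MChar l '0' '1' st.1 ∧ MChar l '1' '0' st.2.1 ∧ RunsOK l st.2.2.1 st.2.2.2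

-- reductions of the port-B helper
lemma upd_none (m01 m10 : Int) (cur : Option (Char × Int)) :
    funcAltUpd m01 m10 none cur = (m01, m10, none, cur) := rfl

lemma upd_red (m01 m10 : Int) (p c : Char) (pl cl : Int) :
    funcAltUpd m01 m10 (some (p, pl)) (some (c, cl)) =
      if p = '0' ∧ c = '1' then (max m01 (min pl cl), m10, some (p, pl), some (c, cl))
      else if p = '1' ∧ c = '0' then (m01, max m10 (min pl cl), some (p, pl), some (c, cl))
      else (m01, m10, some (p, pl), some (c, cl)) := by
  simp only [funcAltUpd, Bool.and_eq_true, beq_iff_eq]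

lemma pat_len (a b : Char) (i : Nat) : (pvPat a b i).length = 2 * i := by
  simp [pvPat]; omega

lemma pat_ne_nil {a b : Char} {i : Nat} (hi : 0 < i) : pvPat a b i ≠ [] := by
  intro h
  have hlen := pat_len a b i
  rw [h] at hlen
  simp at hlen
  omega

lemma getLast?_replicate_pos {c : Char} {n : Nat} (h : 0 < n) :
    (List.replicate n c).getLast? = some c := by
  rw [List.getLast?_replicate, if_neg (by omega)]

lemma last_append_ne_nil {u t : List Char} (hu : u ≠ []) :
    (t ++ u).getLast? = u.getLast? := by
  rw [List.getLast?_append]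
  cases hu' : u.getLast? with
  | some a => rfl
  | none => exact absurd (List.getLast?_eq_none_iff.mp hu') hu

lemma pat_getLast? {a b : Char} {i : Nat} (hi : 0 < i) :
    (pvPat a b i).getLast? = some b := by
  rw [pvPat, List.getLast?_append, getLast?_replicate_pos hi]
  rfl

lemma getLast?_of_suffix {u l : List Char} (h : u <:+ l) (hu : u ≠ []) :
    l.getLast? = u.getLast? := by
  obtain ⟨t, rfl⟩ := h
  exact last_append_ne_nil hu

-- i copies of c are a suffix of w ++ c^n iff i ≤ n, when w does not end in c
lemma rep_suffix_iff {w : List Char} {c : Char} {n i : Nat} (hw : w.getLast? ≠ some c) :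
    List.replicate i c <:+ w ++ List.replicate n c ↔ i ≤ n := by
  constructor
  · rintro ⟨t, ht⟩
    by_contra hni
    have hni' : n < i := by omega
    have hi : i = (i - n) + n := by omega
    rw [hi, List.replicate_add, ← List.append_assoc] at ht
    have hw' := List.append_cancel_right ht
    apply hw
    rw [← hw', last_append_ne_nil (by simp; omega)]
    exact getLast?_replicate_pos (by omega)
  · intro hin
    have hrep : List.replicate n c = List.replicate (n - i) c ++ List.replicate i c := by
      rw [← List.replicate_add]; congr 1; omega
    rw [hrep, ← List.append_assoc]
    exact List.suffix_append _ _

-- u ++ c^i a suffix of v ++ c^n forces i = n and u a suffix of v (u, v not ending in c)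
lemma block_suffix_iff {u v : List Char} {c : Char} {i n : Nat} (hu : u ≠ [])
    (huc : u.getLast? ≠ some c) (hvc : v.getLast? ≠ some c) :
    (u ++ List.replicate i c) <:+ (v ++ List.replicate n c) ↔ i = n ∧ u <:+ v := by
  constructor
  · rintro ⟨t, ht⟩
    rcases lt_trichotomy i n with h | h | h
    · exfalso
      have hn : n = (n - i) + i := by omega
      rw [hn, List.replicate_add] at ht
      have ht' : (t ++ u) ++ List.replicate i c
          = (v ++ List.replicate (n - i) c) ++ List.replicate i c := by
        simpa [List.append_assoc] using ht
      have he := List.append_cancel_right ht'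
      apply huc
      rw [← last_append_ne_nil (t := t) hu, he,
        last_append_ne_nil (by simp; omega)]
      exact getLast?_replicate_pos (by omega)
    · subst h
      have ht' : (t ++ u) ++ List.replicate i c = v ++ List.replicate i c := by
        simpa [List.append_assoc] using ht
      exact ⟨rfl, t, List.append_cancel_right ht'⟩
    · exfalso
      have hi : i = (i - n) + n := by omega
      rw [hi, List.replicate_add] at ht
      have ht' : (t ++ (u ++ List.replicate (i - n) c)) ++ List.replicate n c
          = v ++ List.replicate n c := by
        simpa [List.append_assoc] using ht
      have he := List.append_cancel_right ht'
      apply hvc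
      rw [← he, last_append_ne_nil (by simp; omega),
        last_append_ne_nil (by simp; omega)]
      exact getLast?_replicate_pos (by omega)
  · rintro ⟨rfl, t, rfl⟩
    exact ⟨t, by simp [List.append_assoc]⟩

lemma infix_snoc (t l : List Char) (x : Char) :
    t <:+: l ++ [x] ↔ t <:+: l ∨ t <:+ l ++ [x] := by
  constructor
  · intro h
    have h' : t.reverse <:+: x :: l.reverse := by
      have hrev := List.reverse_infix.mpr h
      simpa using hrev
    rcases List.infix_cons_iff.mp h' with hp | hi
    · right
      have hp2 : t.reverse <+: (l ++ [x]).reverse := by simpa using hp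
      have hs := List.reverse_suffix.mpr hp2
      simpa using hs
    · left
      exact List.reverse_infix.mp (by simpa using hi)
  · rintro (⟨u, v, rfl⟩ | h)
    · exact ⟨u, v ++ [x], by simp⟩
    · exact h.isInfix

lemma pat_infix_runs {a b : Char} {i m n : Nat} (him : i ≤ m) (hin : i ≤ n) :
    pvPat a b i <:+: List.replicate m a ++ List.replicate n b := by
  have h1 : List.replicate m a = List.replicate (m - i) a ++ List.replicate i a := by
    rw [← List.replicate_add]; congr 1; omega
  have h2 : List.replicate n b = List.replicate i b ++ List.replicate (n - i) b := by
    rw [← List.replicate_add]; congr 1; omega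
  rw [h1, h2]
  refine ⟨List.replicate (m - i) a, List.replicate (n - i) b, ?_⟩
  simp [pvPat, List.append_assoc]
  rw [List.replicate_add (m - i) i a, List.append_assoc]

-- a pattern ending in b is never a suffix of a list ending in c ≠ b
lemma pat_not_suffix_of_last_ne {a b c : Char} {i : Nat} (hi : 0 < i) (hbc : b ≠ c)
    {l : List Char} (hl : l.getLast? = some c) : ¬ (pvPat a b i <:+ l) := by
  intro h
  have heq := getLast?_of_suffix h (pat_ne_nil hi)
  rw [hl, pat_getLast? hi] at heq
  injection heq with heq'
  exact hbc heq'.symm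

-- which pattern suffixes exist, in terms of the run state
lemma pat_suffix_char {a b : Char} (hab : a ≠ b) {i : Nat} (hi : 0 < i)
    {l : List Char} {prev cur : Option (Char × Int)} (h : RunsOK l prev cur) :
    (pvPat a b i <:+ l) ↔
      ∃ pl : Nat, prev = some (a, (pl : Int)) ∧ cur = some (b, (i : Int)) ∧ i ≤ pl := by
  rcases h with ⟨hcur, hprev, rfl⟩ | ⟨c, cl, hcur, hcl, hrest⟩
  · subst hcur; subst hprev
    simp only [List.suffix_nil]
    constructor
    · intro h; exact absurd h (pat_ne_nil hi)
    · rintro ⟨pl, hp, _⟩; cases hp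
  · subst hcur
    by_cases hbc : b = c
    · subst hbc
      rcases hrest with ⟨hprev, rfl⟩ | ⟨p, pl, l0, hprev, hpl, hpc, rfl, hl0⟩
      · subst hprev
        constructor
        · intro hs
          exfalso
          have hs' : (List.replicate i a ++ List.replicate i b)
              <:+ ([] ++ List.replicate cl b) := by
            simpa [pvPat] using hs
          have hblock := (block_suffix_iff (by simp; omega)
            (by rw [getLast?_replicate_pos hi]; simp [hab]) (by simp)).mp hs'
          rcases hblock with ⟨_, hsuf⟩
          have hnil := List.suffix_nil.mp hsuf
          have hlen := congrArg List.length hnil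
          simp at hlen
          omega
        · rintro ⟨pl, hp, _⟩; cases hp
      · subst hprev
        have hkey : (pvPat a b i <:+ l0 ++ List.replicate pl p ++ List.replicate cl b)
            ↔ i = cl ∧ List.replicate i a <:+ l0 ++ List.replicate pl p := by
          rw [pvPat, show l0 ++ List.replicate pl p ++ List.replicate cl b
              = (l0 ++ List.replicate pl p) ++ List.replicate cl b by simp [List.append_assoc]]
          exact block_suffix_iff (by simp; omega)
            (by rw [getLast?_replicate_pos hi]; simp [hab])
            (by rw [last_append_ne_nil (by simp; omega), getLast?_replicate_pos hpl]; simp [hpc])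
        rw [hkey]
        by_cases hap : a = p
        · subst hap
          rw [rep_suffix_iff hl0]
          constructor
          · rintro ⟨rfl, hle⟩
            exact ⟨pl, rfl, rfl, hle⟩
          · rintro ⟨pl', hp, hc, hle⟩
            injection hp with hp'
            injection hp' with hp1 hp2
            injection hc with hc'
            injection hc' with hc1 hc2
            have hpl2 : pl = pl' := by exact_mod_cast hp2
            have hcl2 : cl = i := by exact_mod_cast hc2
            omega
        · constructor
          · rintro ⟨rfl, hsuf⟩
            exfalso
            have hlast : (l0 ++ List.replicate pl p).getLast? = some p := by
              rw [last_append_ne_nil (by simp; omega)]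
              exact getLast?_replicate_pos hpl
            have heq := getLast?_of_suffix hsuf (by simp; omega)
            rw [hlast, getLast?_replicate_pos hi] at heq
            injection heq with heq'
            exact hap heq'.symm
          · rintro ⟨pl', hp, _, _⟩
            injection hp with hp'
            injection hp' with hp1 hp2
            exact absurd hp1.symm hap
    · constructor
      · intro hs
        exfalso
        rcases hrest with ⟨hprev, rfl⟩ | ⟨p, pl, l0, hprev, hpl, hpc, rfl, hl0⟩
        · exact pat_not_suffix_of_last_ne hi hbc (getLast?_replicate_pos hcl) hs
        · refine pat_not_suffix_of_last_ne hi hbc ?_ hs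
          rw [last_append_ne_nil (by simp; omega)]
          exact getLast?_replicate_pos hcl
      · rintro ⟨pl, hp, hc, _⟩
        injection hc with hc'
        injection hc' with hc1 hc2
        exact absurd hc1.symm hbc

lemma mchar_keep {a b : Char} {l : List Char} {x : Char} {m : Int}
    (h : MChar l a b m) (hno : ∀ i : Nat, 0 < i → ¬ (pvPat a b i <:+ l ++ [x])) :
    MChar (l ++ [x]) a b m := by
  refine ⟨h.1, fun i hi => ?_⟩
  rw [infix_snoc]
  have h2 := h.2 i hi
  have h3 := hno i hi
  tauto

lemma mchar_match {a b : Char} (hab : a ≠ b) {l l0 : List Char} {x : Char} {m : Int}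
    (h : MChar l a b m) {pl cl : Nat} (hpl : 0 < pl) (hcl : 0 < cl)
    (hdec : l ++ [x] = l0 ++ List.replicate pl a ++ List.replicate cl b)
    (hl0 : l0.getLast? ≠ some a) :
    MChar (l ++ [x]) a b (max m (min (pl : Int) (cl : Int))) := by
  have hrok : RunsOK (l ++ [x]) (some (a, (pl : Int))) (some (b, (cl : Int))) :=
    Or.inr ⟨b, cl, rfl, hcl, Or.inr ⟨a, pl, l0, rfl, hpl, hab, hdec, hl0⟩⟩
  refine ⟨by have := h.1; omega, fun i hi => ?_⟩
  constructor
  · intro hinf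
    rcases (infix_snoc _ _ _).mp hinf with hold | hsuf
    · have := (h.2 i hi).mp hold
      omega
    · obtain ⟨pl', hp, hc, hle⟩ := (pat_suffix_char hab hi hrok).mp hsuf
      injection hp with hp'
      injection hp' with hp1 hp2
      injection hc with hc'
      injection hc' with hc1 hc2
      have hpl2 : pl = pl' := by exact_mod_cast hp2
      have hcl2 : cl = i := by exact_mod_cast hc2
      omega
  · intro hle
    by_cases him : (i : Int) ≤ m
    · exact (infix_snoc _ _ _).mpr (Or.inl ((h.2 i hi).mpr him))
    · have hip : i ≤ pl := by omega
      have hic : i ≤ cl := by omega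
      have h1 : pvPat a b i <:+: List.replicate pl a ++ List.replicate cl b :=
        pat_infix_runs hip hic
      have h2 : List.replicate pl a ++ List.replicate cl b
          <:+: l0 ++ List.replicate pl a ++ List.replicate cl b :=
        ⟨l0, [], by simp [List.append_assoc]⟩
      rw [hdec]
      exact h1.trans h2

-- the M-component update, phrased on the state the code produces
lemma mchar_step {a b : Char} (hab : a ≠ b) {l : List Char} {x : Char} {m m' : Int}
    (h : MChar l a b m) {prev cur : Option (Char × Int)} (hrok : RunsOK (l ++ [x]) prev cur)
    (hm' : (∃ pl cl : Nat, prev = some (a, (pl : Int)) ∧ cur = some (b, (cl : Int)) ∧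
              m' = max m (min (pl : Int) (cl : Int))) ∨
           ((∀ pl cl : Int, ¬(prev = some (a, pl) ∧ cur = some (b, cl))) ∧ m' = m)) :
    MChar (l ++ [x]) a b m' := by
  rcases hm' with ⟨pl, cl, hprev, hcur, rfl⟩ | ⟨hno, rfl⟩
  · rcases hrok with ⟨hc, _, _⟩ | ⟨c', cl', hcur', hcl', hrest⟩
    · rw [hcur] at hc; cases hc
    · rw [hcur] at hcur'
      injection hcur' with hcur''
      injection hcur'' with hb1 hb2
      have hcleq : cl = cl' := by exact_mod_cast hb2
      subst hb1; subst hcleq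
      rcases hrest with ⟨hprev', _⟩ | ⟨p, pl', l0, hprev', hpl', hpc, hdec, hl0⟩
      · rw [hprev] at hprev'; cases hprev'
      · rw [hprev] at hprev'
        injection hprev' with hprev''
        injection hprev'' with ha1 ha2
        have hpleq : pl = pl' := by exact_mod_cast ha2
        subst ha1; subst hpleq
        exact mchar_match hab h hpl' hcl' hdec hl0
  · refine mchar_keep h (fun i hi hs => ?_)
    obtain ⟨pl, hp, hc, _⟩ := (pat_suffix_char hab hi hrok).mp hs
    exact hno _ _ ⟨hp, hc⟩

-- run-structure updates
lemma runsok_snoc_extend {l : List Char} {c : Char} {cl : Nat} {prev : Option (Char × Int)}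
    (hrok : RunsOK l prev (some (c, (cl : Int)))) :
    RunsOK (l ++ [c]) prev (some (c, (cl : Int) + 1)) := by
  rcases hrok with ⟨hc, _, _⟩ | ⟨c', cl', hcur', hcl', hrest⟩
  · cases hc
  · injection hcur' with h'
    injection h' with h1 h2
    have hcleq : cl = cl' := by exact_mod_cast h2
    subst h1; subst hcleq
    refine Or.inr ⟨c, cl + 1, by simp, by omega, ?_⟩
    rcases hrest with ⟨hprev, rfl⟩ | ⟨p, pl, l0, hprev, hpl, hpc, rfl, hl0⟩
    · exact Or.inl ⟨hprev, by simp [List.replicate_succ']⟩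
    · exact Or.inr ⟨p, pl, l0, hprev, hpl, hpc,
        by simp [List.replicate_succ', List.append_assoc], hl0⟩

lemma runsok_snoc_new {l : List Char} {x c : Char} {cl : Nat} {prev : Option (Char × Int)}
    (hrok : RunsOK l prev (some (c, (cl : Int)))) (hxc : c ≠ x) :
    RunsOK (l ++ [x]) (some (c, (cl : Int))) (some (x, (1 : Int))) := by
  rcases hrok with ⟨hc, _, _⟩ | ⟨c', cl', hcur', hcl', hrest⟩
  · cases hc
  · injection hcur' with h'
    injection h' with h1 h2
    have hcleq : cl = cl' := by exact_mod_cast h2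
    subst h1; subst hcleq
    refine Or.inr ⟨x, 1, by norm_num, by omega, Or.inr ⟨c, cl, ?_⟩⟩
    rcases hrest with ⟨hprev, rfl⟩ | ⟨p, pl, l0, hprev, hpl, hpc, rfl, hl0⟩
    · exact ⟨[], rfl, hcl', hxc, by simp [List.replicate_succ'], by simp⟩
    · refine ⟨l0 ++ List.replicate pl p, rfl, hcl', hxc,
        by simp [List.replicate_succ', List.append_assoc], ?_⟩
      rw [last_append_ne_nil (by simp; omega), getLast?_replicate_pos hpl]
      simp [hpc]

lemma pinv_step {l : List Char} {st : Int × Int × Option (Char × Int) × Option (Char × Int)}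
    (h : PInv l st) (x : Char) : PInv (l ++ [x]) (funcAltStep st x) := by
  obtain ⟨m01, m10, prev, cur⟩ := st
  obtain ⟨h01, h10, hrok0⟩ := h
  simp only at h01 h10 hrok0
  have hne : ('0' : Char) ≠ '1' := by decide
  have hne' : ('1' : Char) ≠ '0' := by decide
  rcases hrok0 with ⟨hcur, hprev, rfl⟩ | ⟨c, cl, hcur, hcl, hrest⟩
  · subst hcur; subst hprev
    have hrok : RunsOK ([] ++ [x]) none (some (x, (1 : Int))) :=
      Or.inr ⟨x, 1, by norm_num, by omega, Or.inl ⟨rfl, by simp⟩⟩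
    have hstep : funcAltStep ((m01, m10, none, none) :
        Int × Int × Option (Char × Int) × Option (Char × Int)) x
        = (m01, m10, none, some (x, 1)) := rfl
    rw [hstep]
    exact ⟨mchar_step hne h01 hrok (Or.inr ⟨(by rintro _ _ ⟨hp, _⟩; cases hp), rfl⟩),
           mchar_step hne' h10 hrok (Or.inr ⟨(by rintro _ _ ⟨hp, _⟩; cases hp), rfl⟩),
           hrok⟩
  · subst hcur
    by_cases hxc : c = x
    · subst hxc
      have hrok : RunsOK (l ++ [c]) prev (some (c, (cl : Int) + 1)) :=
        runsok_snoc_extend (Or.inr ⟨c, cl, rfl, hcl, hrest⟩)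
      have hstep : funcAltStep ((m01, m10, prev, some (c, (cl : Int))) :
          Int × Int × Option (Char × Int) × Option (Char × Int)) c
          = funcAltUpd m01 m10 prev (some (c, (cl : Int) + 1)) := by
        simp [funcAltStep]
      rcases hrest with ⟨hprev, hl⟩ | ⟨p, pl, l0, hprev, hpl, hpc, hl, hl0⟩
      · subst hprev
        rw [hstep, upd_none]
        exact ⟨mchar_step hne h01 hrok (Or.inr ⟨(by rintro _ _ ⟨hp, _⟩; cases hp), rfl⟩),
               mchar_step hne' h10 hrok (Or.inr ⟨(by rintro _ _ ⟨hp, _⟩; cases hp), rfl⟩),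
               hrok⟩
      · subst hprev
        rw [hstep, upd_red]
        by_cases h0 : p = '0' ∧ c = '1'
        · obtain ⟨rfl, rfl⟩ := h0
          rw [if_pos ⟨rfl, rfl⟩]
          refine ⟨mchar_step hne h01 hrok (Or.inl ⟨pl, cl + 1, rfl, by simp, by simp⟩),
                  mchar_step hne' h10 hrok (Or.inr ⟨?_, rfl⟩), hrok⟩
          rintro _ _ ⟨hp, _⟩
          injection hp with hp'
          injection hp' with hp1 hp2
          exact absurd hp1 (by decide)
        · rw [if_neg h0]
          by_cases h1 : p = '1' ∧ c = '0'
          · obtain ⟨rfl, rfl⟩ := h1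
            rw [if_pos ⟨rfl, rfl⟩]
            refine ⟨mchar_step hne h01 hrok (Or.inr ⟨?_, rfl⟩),
                    mchar_step hne' h10 hrok (Or.inl ⟨pl, cl + 1, rfl, by simp, by simp⟩), hrok⟩
            rintro _ _ ⟨hp, _⟩
            injection hp with hp'
            injection hp' with hp1 hp2
            exact absurd hp1 (by decide)
          · rw [if_neg h1]
            refine ⟨mchar_step hne h01 hrok (Or.inr ⟨?_, rfl⟩),
                    mchar_step hne' h10 hrok (Or.inr ⟨?_, rfl⟩), hrok⟩
            · rintro _ _ ⟨hp, hc⟩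
              injection hp with hp'
              injection hp' with hp1 hp2
              injection hc with hc'
              injection hc' with hc1 hc2
              exact h0 ⟨hp1, hc1⟩
            · rintro _ _ ⟨hp, hc⟩
              injection hp with hp'
              injection hp' with hp1 hp2
              injection hc with hc'
              injection hc' with hc1 hc2
              exact h1 ⟨hp1, hc1⟩
    · have hrok : RunsOK (l ++ [x]) (some (c, (cl : Int))) (some (x, (1 : Int))) :=
        runsok_snoc_new (Or.inr ⟨c, cl, rfl, hcl, hrest⟩) hxc
      have hstep : funcAltStep ((m01, m10, prev, some (c, (cl : Int))) :
          Int × Int × Option (Char × Int) × Option (Char × Int)) x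
          = funcAltUpd m01 m10 (some (c, (cl : Int))) (some (x, 1)) := by
        simp [funcAltStep, hxc]
      rw [hstep, upd_red]
      by_cases h0 : c = '0' ∧ x = '1'
      · obtain ⟨rfl, rfl⟩ := h0
        rw [if_pos ⟨rfl, rfl⟩]
        refine ⟨mchar_step hne h01 hrok (Or.inl ⟨cl, 1, rfl, by norm_num, by norm_num⟩),
                mchar_step hne' h10 hrok (Or.inr ⟨?_, rfl⟩), hrok⟩
        rintro _ _ ⟨hp, _⟩
        injection hp with hp'
        injection hp' with hp1 hp2
        exact absurd hp1 (by decide)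
      · rw [if_neg h0]
        by_cases h1 : c = '1' ∧ x = '0'
        · obtain ⟨rfl, rfl⟩ := h1
          rw [if_pos ⟨rfl, rfl⟩]
          refine ⟨mchar_step hne h01 hrok (Or.inr ⟨?_, rfl⟩),
                  mchar_step hne' h10 hrok (Or.inl ⟨cl, 1, rfl, by norm_num, by norm_num⟩), hrok⟩
          rintro _ _ ⟨hp, _⟩
          injection hp with hp'
          injection hp' with hp1 hp2
          exact absurd hp1 (by decide)
        · rw [if_neg h1]
          refine ⟨mchar_step hne h01 hrok (Or.inr ⟨?_, rfl⟩),
                  mchar_step hne' h10 hrok (Or.inr ⟨?_, rfl⟩), hrok⟩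
          · rintro _ _ ⟨hp, hc⟩
            injection hp with hp'
            injection hp' with hp1 hp2
            injection hc with hc'
            injection hc' with hc1 hc2
            exact h0 ⟨hp1, hc1⟩
          · rintro _ _ ⟨hp, hc⟩
            injection hp with hp'
            injection hp' with hp1 hp2
            injection hc with hc'
            injection hc' with hc1 hc2
            exact h1 ⟨hp1, hc1⟩

lemma pinv_fold (l : List Char) : PInv l (l.foldl funcAltStep (0, 0, none, none)) := by
  induction l using List.reverseRecOn with
  | nil =>
    rw [List.foldl_nil]
    refine ⟨⟨le_refl _, fun i hi => ?_⟩, ⟨le_refl _, fun i hi => ?_⟩, Or.inl ⟨rfl, rfl, rfl⟩⟩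
    all_goals
      constructor
      · intro h
        exfalso
        have hle := h.length_le
        rw [pat_len] at hle
        simp at hle
        omega
      · intro h
        exfalso
        have h' : (i : Int) ≤ 0 := h
        omega
  | append_singleton l x ih =>
    rw [List.foldl_append]
    simpa using pinv_step ih x

-- A-side: count of i in [1..k] with the pattern an infix
def pvCnt (l : List Char) (a b : Char) : Nat → Nat
  | 0 => 0
  | Nat.succ k => pvCnt l a b k + (if pvPat a b (k + 1) <:+: l then 1 else 0)

lemma funcStep_len (s : String) (out : List (List Char)) (k : Nat) :
    (funcStep s out (1 + (k : Int))).length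
      = out.length + (if pvPat '0' '1' (k + 1) <:+: s.toList then 1 else 0)
                   + (if pvPat '1' '0' (k + 1) <:+: s.toList then 1 else 0) := by
  have hto : (1 + (k : Int)).toNat = k + 1 := by omega
  have h0 : PySem.List.pyRepeat ['0'] (1 + (k : Int)) = List.replicate (k + 1) '0' := by
    rw [PySem.List.pyRepeat_singleton, hto]
  have h1 : PySem.List.pyRepeat ['1'] (1 + (k : Int)) = List.replicate (k + 1) '1' := by
    rw [PySem.List.pyRepeat_singleton, hto]
  have e01 : (PySem.Chars.isIn (List.replicate (k + 1) '0' ++ List.replicate (k + 1) '1')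
      s.toList = true) ↔ pvPat '0' '1' (k + 1) <:+: s.toList := by
    rw [pvPat]; exact PySem.Chars.isIn_iff_infix _ _
  have e10 : (PySem.Chars.isIn (List.replicate (k + 1) '1' ++ List.replicate (k + 1) '0')
      s.toList = true) ↔ pvPat '1' '0' (k + 1) <:+: s.toList := by
    rw [pvPat]; exact PySem.Chars.isIn_iff_infix _ _
  simp only [funcStep, h0, h1]
  by_cases hA : pvPat '0' '1' (k + 1) <:+: s.toList
  · by_cases hB : pvPat '1' '0' (k + 1) <:+: s.toList
    · rw [if_pos (e01.mpr hA), if_pos (e10.mpr hB), if_pos hA, if_pos hB]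
      simp
    · rw [if_pos (e01.mpr hA), if_neg (fun h => hB (e10.mp h)), if_pos hA, if_neg hB]
      simp
  · by_cases hB : pvPat '1' '0' (k + 1) <:+: s.toList
    · rw [if_neg (fun h => hA (e01.mp h)), if_pos (e10.mpr hB), if_neg hA, if_pos hB]
      simp
    · rw [if_neg (fun h => hA (e01.mp h)), if_neg (fun h => hB (e10.mp h)), if_neg hA, if_neg hB]
      simp

lemma foldl_funcStep_len (s : String) (k : Nat) :
    ∀ init : List (List Char),
      ((PySem.List.pyRange 1 (1 + (k : Int)) 1).foldl (funcStep s) init).length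
        = init.length + pvCnt s.toList '0' '1' k + pvCnt s.toList '1' '0' k := by
  induction k with
  | zero =>
    intro init
    rw [PySem.List.pyRange_one_eq_nil (by norm_num)]
    simp [pvCnt]
  | succ k ih =>
    intro init
    have hsplit : PySem.List.pyRange 1 (1 + ((k : Nat) + 1 : Nat) : Int) 1
        = PySem.List.pyRange 1 (1 + (k : Int)) 1 ++ [1 + (k : Int)] := by
      have h := PySem.List.pyRange_one_succ_right (a := 1) (b := 1 + (k : Int)) (by omega)
      rw [show ((1 : Int) + ((k : Nat) + 1 : Nat)) = 1 + (k : Int) + 1 by push_cast; ring]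
      exact h
    rw [hsplit, List.foldl_append]
    simp only [List.foldl_cons, List.foldl_nil]
    rw [funcStep_len, ih init]
    simp only [pvCnt]
    omega


lemma cnt_eq_min' {l : List Char} {a b : Char} {m : Int} (h : MChar l a b m) (k : Nat) :
    (pvCnt l a b k : Int) = min m (k : Int) := by
  induction k with
  | zero =>
    have h1 := h.1
    simp only [pvCnt, Nat.cast_zero]
    omega
  | succ k ih =>
    have hchar := h.2 (k + 1) (by omega)
    by_cases hp : pvPat a b (k + 1) <:+: l
    · have hle := hchar.mp hp
      simp only [pvCnt, if_pos hp]
      push_cast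
      push_cast at ih hle
      omega
    · have hgt : ¬ ((k : Int) + 1 ≤ m) := by
        intro hc
        exact hp (hchar.mpr (by push_cast; omega))
      simp only [pvCnt, if_neg hp]
      push_cast
      push_cast at ih
      omega

lemma mchar_le_half {l : List Char} {a b : Char} {m : Int} (h : MChar l a b m) :
    2 * m ≤ (l.length : Int) := by
  by_cases hm : m ≤ 0
  · have hl : (0 : Int) ≤ l.length := by positivity
    omega
  · have hi : 0 < m.toNat := by omega
    have hinf := (h.2 m.toNat hi).mpr (by omega)
    have hle := hinf.length_le
    rw [pat_len] at hle
    omega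

-- ===== VERDICT (by name: the statement is the Claim_ definition above) =====
theorem func_spec : Claim_equal_func := by
  intro s _
  show func s = func_alt s
  obtain ⟨h01, h10, _⟩ := pinv_fold s.toList
  unfold func func_alt
  set st := s.toList.foldl funcAltStep (0, 0, none, none) with hst
  set L := PySem.Int.floordiv (PySem.Str.len s) 2 with hL
  show (((PySem.List.pyRange 1 (L + 1) 1).foldl (funcStep s) []).length : Int) = st.1 + st.2.1
  have hlen : PySem.Str.len s = (s.toList.length : Int) := by
    simp [PySem.Str.len_eq]
  have h2m01 := mchar_le_half h01
  have h2m10 := mchar_le_half h10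
  have hm01L : st.1 ≤ L := by
    rw [hL, hlen, PySem.Int.le_floordiv_iff_mul_le (by norm_num)]
    omega
  have hm10L : st.2.1 ≤ L := by
    rw [hL, hlen, PySem.Int.le_floordiv_iff_mul_le (by norm_num)]
    omega
  have hL0 : 0 ≤ L := by
    rw [hL, hlen, PySem.Int.le_floordiv_iff_mul_le (by norm_num)]
    omega
  have hL1 : L + 1 = 1 + ((L.toNat : Nat) : Int) := by omega
  rw [hL1, foldl_funcStep_len s L.toNat []]
  have hc01 := cnt_eq_min' h01 L.toNat
  have hc10 := cnt_eq_min' h10 L.toNat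
  have hLt : ((L.toNat : Nat) : Int) = L := by omega
  rw [hLt] at hc01 hc10
  have h01' := h01.1
  have h10' := h10.1
  simp only [List.length_nil]
  push_cast
  omega
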